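-- pv_equiv track=rewrite | github.com/AtuboDad/code-segment | utils/common_util.py | find_parent_path
-- ===== SOURCE A (Python) =====
-- def find_parent_path(file_absolute_path, char_1):
--     count = 0
--     index_arr = []
--
--     for each_char in file_absolute_path:
--         count += 1
--         if each_char == char_1:
--             index_arr.append(count - 1)
--
--     if len(index_arr) > 0:
--         return file_absolute_path[0:index_arr[len(index_arr) - 1]]
--     return ''
-- ===== SOURCE B (Python) =====
-- def find_parent_path(file_absolute_path, char_1):
--     # Scan backwards: first match from the end is the last occurrence.
--     for i in range(len(file_absolute_path) - 1, -1, -1):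
--         if file_absolute_path[i] == char_1:
--             return file_absolute_path[:i]
--     return ''
-- ===== Notes on version B (the rewrite author's own statement) =====
-- stated objective: alternative
-- what changed: B scans the string backwards and returns at the first match (the last occurrence), instead of A's forward pass collecting all match indices into a list and slicing at its last element.
import Mathlib
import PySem

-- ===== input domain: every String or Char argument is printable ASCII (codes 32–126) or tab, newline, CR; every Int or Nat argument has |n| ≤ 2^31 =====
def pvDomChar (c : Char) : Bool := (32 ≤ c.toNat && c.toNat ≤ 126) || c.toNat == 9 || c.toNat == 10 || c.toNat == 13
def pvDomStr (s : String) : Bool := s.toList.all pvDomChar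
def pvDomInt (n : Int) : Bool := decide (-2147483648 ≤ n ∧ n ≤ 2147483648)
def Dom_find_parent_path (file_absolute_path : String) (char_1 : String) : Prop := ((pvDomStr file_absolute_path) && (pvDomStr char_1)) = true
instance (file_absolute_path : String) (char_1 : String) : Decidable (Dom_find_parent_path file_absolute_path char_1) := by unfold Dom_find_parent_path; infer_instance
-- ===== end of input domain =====

-- B scans the string backwards and returns at the first match (the last occurrence),
-- instead of A's forward pass collecting every match index into a list (objective: alternative).

-- ===== PORT A =====
-- A's loop body: count += 1; if each_char == char_1: index_arr.append(count - 1)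
def fppStep (char_1 : String) (st : Int × List Int) (each_char : Char) : Int × List Int :=
  let count := st.1 + 1
  if String.mk [each_char] = char_1 then (count, st.2 ++ [count - 1]) else (count, st.2)

def find_parent_path (file_absolute_path : String) (char_1 : String) : String :=
  let st := file_absolute_path.toList.foldl (fppStep char_1) (0, [])
  let index_arr := st.2
  if index_arr.length > 0 then
    String.mk (PySem.List.slice file_absolute_path.toList (some 0)
      (some (PySem.List.pyGetD index_arr ((index_arr.length : Int) - 1) 0)))
  else ""

-- ===== PORT B =====
-- B's backward scan: walk the reversed character list; on the first match, rest.length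
-- is that character's index in the original string.
def fppScanBack (char_1 : String) : List Char → Option Nat
  | [] => none
  | c :: rest => if String.mk [c] = char_1 then some rest.length else fppScanBack char_1 rest

def find_parent_path_alt (file_absolute_path : String) (char_1 : String) : String :=
  match fppScanBack char_1 file_absolute_path.toList.reverse with
  | some i => String.mk (file_absolute_path.toList.take i)   -- file_absolute_path[:i]
  | none => ""

-- ===== PRECONDITION & SPEC =====
def Spec_find_parent_path (file_absolute_path : String) (char_1 : String) (out : String) : Prop := out = find_parent_path_alt file_absolute_path char_1
instance (file_absolute_path : String) (char_1 : String) (out : String) : Decidable (Spec_find_parent_path file_absolute_path char_1 out) := by unfold Spec_find_parent_path; infer_instance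

-- ===== CLAIM (what is proved, stated in full; the proofs are below) =====
def Claim_equal_find_parent_path : Prop := ∀ (file_absolute_path : String) (char_1 : String), Dom_find_parent_path file_absolute_path char_1 → Spec_find_parent_path file_absolute_path char_1 (find_parent_path file_absolute_path char_1)

-- ===== LEMMAS AND PROOFS =====

-- the indices (starting at offset k) of the characters of l matching char_1, ascending
def fppIdx (char_1 : String) : List Char → Int → List Int
  | [], _ => []
  | c :: r, k => (if String.mk [c] = char_1 then [k] else []) ++ fppIdx char_1 r (k + 1)

lemma fppFold (char_1 : String) (l : List Char) : ∀ (k : Int) (acc : List Int),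
    l.foldl (fppStep char_1) (k, acc) = (k + l.length, acc ++ fppIdx char_1 l k) := by
  induction l with
  | nil => intro k acc; simp [fppIdx]
  | cons c r ih =>
    intro k acc
    simp only [List.foldl_cons, fppStep, fppIdx]
    split_ifs with h
    · rw [ih]
      simp only [Prod.mk.injEq, List.length_cons]
      exact ⟨by push_cast; ring, by simp⟩
    · rw [ih]
      simp only [Prod.mk.injEq, List.length_cons]
      exact ⟨by push_cast; ring, by simp⟩

lemma fppIdx_append (char_1 : String) (a b : List Char) : ∀ (k : Int),
    fppIdx char_1 (a ++ b) k = fppIdx char_1 a k ++ fppIdx char_1 b (k + a.length) := by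
  induction a with
  | nil => intro k; simp [fppIdx]
  | cons c r ih =>
    intro k
    simp only [List.cons_append, fppIdx, ih, List.append_assoc]
    congr 2
    congr 1
    simp only [List.length_cons]
    push_cast; ring

lemma fppLast (char_1 : String) (l : List Char) :
    (fppIdx char_1 l 0).getLast? = (fppScanBack char_1 l.reverse).map (fun n => (n : Int)) := by
  induction l using List.reverseRecOn with
  | nil => simp [fppIdx, fppScanBack]
  | append_singleton l' c ih =>
    rw [fppIdx_append]
    simp only [List.reverse_append, List.reverse_cons, List.reverse_nil, List.nil_append,
      List.cons_append, fppScanBack, fppIdx]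
    split_ifs with h
    · simp
    · simpa [fppIdx] using ih

lemma fpp_getLast_of_ne_nil {arr : List Int} (h : arr ≠ []) :
    PySem.List.pyGetD arr ((arr.length : Int) - 1) 0 = arr[arr.length - 1]'(by
      have := List.length_pos_iff.mpr h; omega) := by
  have hlen : 0 < arr.length := List.length_pos_iff.mpr h
  have hi : ((arr.length : Int) - 1) = ((arr.length - 1 : Nat) : Int) := by omega
  rw [hi, PySem.List.pyGetD_natCast]
  exact List.getD_eq_getElem arr 0 (by omega)

-- ===== VERDICT (by name: the statement is the Claim_ definition above) =====
theorem find_parent_path_spec : Claim_equal_find_parent_path := by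
  intro s c1 _
  unfold Spec_find_parent_path find_parent_path find_parent_path_alt
  have hfold := fppFold c1 s.toList 0 []
  simp only [zero_add, List.nil_append] at hfold
  rw [hfold]
  dsimp only
  have hlast := fppLast c1 s.toList
  cases hscan : fppScanBack c1 s.toList.reverse with
  | none =>
    rw [hscan] at hlast
    simp at hlast
    have : fppIdx c1 s.toList 0 = [] := by
      cases hidx : fppIdx c1 s.toList 0 with
      | nil => rfl
      | cons x xs => rw [hidx] at hlast; simp at hlast
    simp [this]
  | some n =>
    rw [hscan] at hlast
    simp at hlast
    have hne : fppIdx c1 s.toList 0 ≠ [] := by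
      intro h; rw [h] at hlast; simp at hlast
    have hlen : 0 < (fppIdx c1 s.toList 0).length := List.length_pos_iff.mpr hne
    simp only [hlen, if_pos]
    rw [fpp_getLast_of_ne_nil hne]
    have : (fppIdx c1 s.toList 0)[(fppIdx c1 s.toList 0).length - 1]'(by omega) = (n : Int) := by
      have := @List.getLast?_eq_getElem? _ (fppIdx c1 s.toList 0)
      rw [hlast] at this
      have h2 : (fppIdx c1 s.toList 0)[(fppIdx c1 s.toList 0).length - 1]? =
          some ((fppIdx c1 s.toList 0)[(fppIdx c1 s.toList 0).length - 1]'(by omega)) :=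
        List.getElem?_eq_getElem (by omega)
      rw [h2] at this
      exact (Option.some_inj.mp this.symm)
    rw [this]
    rw [PySem.List.slice_zero_start, PySem.List.slice_to_natCast]
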